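-- pv_equiv track=rewrite | github.com/shrockw/cs257 | ProductionCode/recipe_search.py | valid_recipe
-- ===== SOURCE A (Python) =====
-- def valid_recipe(recipe_ingredients, wanted_ingredients, unwanted_ingredients):
--     '''Check if a recipe is valid based on the wanted and unwanted ingredients.'''
--     for wanted_ingredient in wanted_ingredients:
--         if not contains_wanted_ingredient(wanted_ingredient, recipe_ingredients):
--             return False
--     for unwanted_ingredient in unwanted_ingredients:
--         if contains_unwanted_ingredient(unwanted_ingredient, recipe_ingredients):
--             return False
--     return True
--
-- def contains_wanted_ingredient(wanted_ingredient, recipe_ingredients):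
--     '''Check if a wanted ingredient is in the recipe.'''
--     for ingredient in recipe_ingredients:
--         if wanted_ingredient in ingredient:
--             return True
--     return False
--
-- def contains_unwanted_ingredient(unwanted_ingredient, recipe_ingredients):
--     '''Check if an unwanted ingredient is in the recipe.'''
--     for ingredient in recipe_ingredients:
--         if unwanted_ingredient in ingredient:
--             return True
--     return False
-- ===== SOURCE B (Python) =====
-- def valid_recipe(recipe_ingredients, wanted_ingredients, unwanted_ingredients):
--     '''Single pass over the recipe: reject on the first unwanted hit, accumulate wanted hits.'''
--     satisfied = set()
--     for ingredient in recipe_ingredients: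
--         for unwanted in unwanted_ingredients:
--             if unwanted in ingredient:
--                 return False
--         for wanted in wanted_ingredients:
--             if wanted not in satisfied and wanted in ingredient:
--                 satisfied.add(wanted)
--     return all(wanted in satisfied for wanted in wanted_ingredients)
-- ===== Notes on version B (the rewrite author's own statement) =====
-- stated objective: alternative
-- what changed: B inverts the loop nesting: one pass over the recipe ingredients maintaining a set of wanted substrings already satisfied (and failing fast on an unwanted hit), instead of A's per-wanted and per-unwanted rescans of the recipe.
import Mathlib
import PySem

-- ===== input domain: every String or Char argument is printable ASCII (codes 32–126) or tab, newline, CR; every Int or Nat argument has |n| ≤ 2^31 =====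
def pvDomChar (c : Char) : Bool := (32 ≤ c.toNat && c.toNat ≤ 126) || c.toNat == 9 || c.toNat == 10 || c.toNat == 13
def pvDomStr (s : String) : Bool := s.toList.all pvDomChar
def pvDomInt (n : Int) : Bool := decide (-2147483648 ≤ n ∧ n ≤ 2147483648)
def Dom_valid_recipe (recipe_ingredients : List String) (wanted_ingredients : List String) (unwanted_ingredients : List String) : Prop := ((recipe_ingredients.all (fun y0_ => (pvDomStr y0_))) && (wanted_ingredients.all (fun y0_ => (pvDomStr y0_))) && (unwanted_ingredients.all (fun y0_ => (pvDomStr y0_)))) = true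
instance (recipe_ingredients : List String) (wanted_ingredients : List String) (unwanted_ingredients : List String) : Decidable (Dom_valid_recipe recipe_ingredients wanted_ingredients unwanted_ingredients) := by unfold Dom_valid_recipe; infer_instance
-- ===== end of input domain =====

-- B replaces A's per-wanted/per-unwanted rescans of the recipe by a single pass over the
-- recipe that maintains a set of wanted substrings already satisfied (alternative decomposition).

-- ===== PORT A =====
-- helper: contains_wanted_ingredient
def containsWantedIngredient (wanted_ingredient : String) : List String → Bool
  | [] => false
  | ingredient :: rest =>
      if PySem.Str.isIn wanted_ingredient ingredient then true
      else containsWantedIngredient wanted_ingredient rest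

-- helper: contains_unwanted_ingredient
def containsUnwantedIngredient (unwanted_ingredient : String) : List String → Bool
  | [] => false
  | ingredient :: rest =>
      if PySem.Str.isIn unwanted_ingredient ingredient then true
      else containsUnwantedIngredient unwanted_ingredient rest

-- A's second loop (over unwanted_ingredients)
def vrUnwantedLoop (recipe_ingredients : List String) : List String → Bool
  | [] => true
  | u :: rest =>
      if containsUnwantedIngredient u recipe_ingredients then false
      else vrUnwantedLoop recipe_ingredients rest

-- A's first loop (over wanted_ingredients); falls through to the second loop
def vrWantedLoop (recipe_ingredients : List String) (unwanted_ingredients : List String) : List String → Bool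
  | [] => vrUnwantedLoop recipe_ingredients unwanted_ingredients
  | w :: rest =>
      if !(containsWantedIngredient w recipe_ingredients) then false
      else vrWantedLoop recipe_ingredients unwanted_ingredients rest

def valid_recipe (recipe_ingredients : List String) (wanted_ingredients : List String) (unwanted_ingredients : List String) : Bool :=
  vrWantedLoop recipe_ingredients unwanted_ingredients wanted_ingredients

-- ===== PORT B =====
-- B's inner wanted loop: add each newly found wanted substring to `satisfied`
def vrAltUpdate (ingredient : String) (satisfied : PySem.Set String) : List String → PySem.Set String
  | [] => satisfied
  | w :: rest =>
      vrAltUpdate ingredient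
        (if !(PySem.Set.contains satisfied w) && PySem.Str.isIn w ingredient
         then PySem.Set.add satisfied w else satisfied) rest

-- B's outer loop over the recipe; none = early `return False` on an unwanted hit
def vrAltScan (wanted_ingredients unwanted_ingredients : List String)
    (satisfied : PySem.Set String) : List String → Option (PySem.Set String)
  | [] => some satisfied
  | ingredient :: rest =>
      if unwanted_ingredients.any (fun u => PySem.Str.isIn u ingredient) then none
      else vrAltScan wanted_ingredients unwanted_ingredients
            (vrAltUpdate ingredient satisfied wanted_ingredients) rest

def valid_recipe_alt (recipe_ingredients : List String) (wanted_ingredients : List String) (unwanted_ingredients : List String) : Bool :=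
  match vrAltScan wanted_ingredients unwanted_ingredients PySem.Set.empty recipe_ingredients with
  | none => false
  | some satisfied => wanted_ingredients.all (fun w => PySem.Set.contains satisfied w)

-- ===== PRECONDITION & SPEC =====
def Spec_valid_recipe (recipe_ingredients : List String) (wanted_ingredients : List String) (unwanted_ingredients : List String) (out : Bool) : Prop := out = valid_recipe_alt recipe_ingredients wanted_ingredients unwanted_ingredients
instance (recipe_ingredients : List String) (wanted_ingredients : List String) (unwanted_ingredients : List String) (out : Bool) : Decidable (Spec_valid_recipe recipe_ingredients wanted_ingredients unwanted_ingredients out) := by unfold Spec_valid_recipe; infer_instance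

-- ===== CLAIM (what is proved, stated in full; the proofs are below) =====
def Claim_equal_valid_recipe : Prop := ∀ (recipe_ingredients : List String) (wanted_ingredients : List String) (unwanted_ingredients : List String), Dom_valid_recipe recipe_ingredients wanted_ingredients unwanted_ingredients → Spec_valid_recipe recipe_ingredients wanted_ingredients unwanted_ingredients (valid_recipe recipe_ingredients wanted_ingredients unwanted_ingredients)

-- ===== LEMMAS AND PROOFS =====

lemma all_congr_mem {α : Type} (l : List α) (f g : α → Bool) (h : ∀ x ∈ l, f x = g x) :
    l.all f = l.all g := by
  induction l with
  | nil => rfl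
  | cons a t ih =>
      simp only [List.all_cons, h a (List.mem_cons_self),
        ih (fun x hx => h x (List.mem_cons_of_mem _ hx))]

lemma set_contains_iff (s : PySem.Set String) (x : String) :
    PySem.Set.contains s x = true ↔ x ∈ s := by
  simp

lemma containsWanted_eq_any (w : String) (r : List String) :
    containsWantedIngredient w r = r.any (fun i => PySem.Str.isIn w i) := by
  induction r with
  | nil => rfl
  | cons i rest ih =>
      simp only [containsWantedIngredient, List.any_cons, ih]
      split_ifs with h
      · rw [h]; rfl
      · rw [Bool.not_eq_true] at h; rw [h]; rfl

lemma containsUnwanted_eq_any (u : String) (r : List String) :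
    containsUnwantedIngredient u r = r.any (fun i => PySem.Str.isIn u i) := by
  induction r with
  | nil => rfl
  | cons i rest ih =>
      simp only [containsUnwantedIngredient, List.any_cons, ih]
      split_ifs with h
      · rw [h]; rfl
      · rw [Bool.not_eq_true] at h; rw [h]; rfl

lemma vrUnwantedLoop_eq_all (r us : List String) :
    vrUnwantedLoop r us = us.all (fun u => !(r.any (fun i => PySem.Str.isIn u i))) := by
  induction us with
  | nil => rfl
  | cons u rest ih =>
      simp only [vrUnwantedLoop, containsUnwanted_eq_any, List.all_cons, ih]
      split_ifs with h
      · rw [h]; rfl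
      · rw [Bool.not_eq_true] at h; rw [h]; rfl

lemma vrWantedLoop_eq (r us ws : List String) :
    vrWantedLoop r us ws
      = (ws.all (fun w => r.any (fun i => PySem.Str.isIn w i))
         && us.all (fun u => !(r.any (fun i => PySem.Str.isIn u i)))) := by
  induction ws with
  | nil => simp [vrWantedLoop, vrUnwantedLoop_eq_all]
  | cons w rest ih =>
      simp only [vrWantedLoop, containsWanted_eq_any, List.all_cons, ih]
      split_ifs with h
      · rw [Bool.not_eq_eq_eq_not] at h
        rw [h]; rfl
      · have h' : (r.any fun i => PySem.Str.isIn w i) = true := by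
          rcases Bool.eq_false_or_eq_true (r.any fun i => PySem.Str.isIn w i) with hb | hb
          · exact hb
          · rw [hb] at h; exact absurd rfl h
        rw [h', Bool.true_and]

lemma mem_vrAltUpdate (i : String) (s : PySem.Set String) (ws : List String) (x : String) :
    x ∈ vrAltUpdate i s ws ↔ x ∈ s ∨ (x ∈ ws ∧ PySem.Str.isIn x i = true) := by
  induction ws generalizing s with
  | nil => simp [vrAltUpdate]
  | cons w rest ih =>
      simp only [vrAltUpdate, ih]
      cases hc : PySem.Set.contains s w <;> cases hin : PySem.Str.isIn w i <;>
        simp only [hc, hin, Bool.not_false, Bool.not_true, Bool.true_and, Bool.false_and,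
          Bool.and_false, Bool.and_true, if_true, if_false, reduceIte]
      · by_cases hxw : x = w
        · subst hxw
          have hin' : PySem.Chars.isIn x.toList i.toList = false := by simpa using hin
          simp [List.mem_cons, hin']
        · simp [List.mem_cons, hxw]
      · rw [PySem.Set.mem_add]
        by_cases hxw : x = w
        · subst hxw
          have hin' : PySem.Chars.isIn x.toList i.toList = true := by simpa using hin
          simp [List.mem_cons, hin']
        · simp [List.mem_cons, hxw, or_assoc]
      · by_cases hxw : x = w
        · subst hxw
          have hs : x ∈ s := (set_contains_iff s x).mp hc
          simp [hs]
        · simp [List.mem_cons, hxw]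
      · by_cases hxw : x = w
        · subst hxw
          have hs : x ∈ s := (set_contains_iff s x).mp hc
          simp [hs]
        · simp [List.mem_cons, hxw]

lemma vrAltScan_eq (ws us : List String) (r : List String) (s : PySem.Set String) :
    (match vrAltScan ws us s r with
     | none => false
     | some sat => ws.all (fun w => PySem.Set.contains sat w))
    = (ws.all (fun w => PySem.Set.contains s w || r.any (fun i => PySem.Str.isIn w i))
       && us.all (fun u => !(r.any (fun i => PySem.Str.isIn u i)))) := by
  induction r generalizing s with
  | nil => simp [vrAltScan]
  | cons i rest ih =>
      simp only [vrAltScan]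
      split_ifs with h
      · rcases List.any_eq_true.mp h with ⟨u, hu, hin⟩
        have hfalse : us.all (fun u => !((i :: rest).any (fun j => PySem.Str.isIn u j))) = false := by
          refine List.all_eq_false.mpr ⟨u, hu, ?_⟩
          have hin' : PySem.Chars.isIn u.toList i.toList = true := by simpa using hin
          simp [List.any_cons, hin']
        rw [hfalse, Bool.and_false]
      · have hus : ∀ u ∈ us, PySem.Str.isIn u i = false := by
          intro u hu
          cases hc : PySem.Str.isIn u i
          · rfl
          · exact absurd (List.any_eq_true.mpr ⟨u, hu, hc⟩) h
        rw [ih]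
        congr 1
        · refine all_congr_mem _ _ _ ?_
          intro w hw
          cases hb : PySem.Str.isIn w i <;> by_cases hs : w ∈ s <;>
            simp [mem_vrAltUpdate, hw, hb, hs, List.any_cons]
        · refine all_congr_mem _ _ _ ?_
          intro u hu
          have h' : PySem.Chars.isIn u.toList i.toList = false := by simpa using hus u hu
          simp [List.any_cons, h']

lemma valid_recipe_alt_eq (r ws us : List String) :
    valid_recipe_alt r ws us
      = (ws.all (fun w => r.any (fun i => PySem.Str.isIn w i))
         && us.all (fun u => !(r.any (fun i => PySem.Str.isIn u i)))) := by
  unfold valid_recipe_alt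
  rw [vrAltScan_eq]
  congr 1

-- ===== VERDICT (by name: the statement is the Claim_ definition above) =====
theorem valid_recipe_spec : Claim_equal_valid_recipe := by
  intro r ws us _
  unfold Spec_valid_recipe
  rw [valid_recipe_alt_eq, valid_recipe, vrWantedLoop_eq]
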